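-- pv_equiv track=rewrite | github.com/oakgreybookshelf/CS200 | Lab_0/functions.py | sum_even_cubes
-- ===== SOURCE A (Python) =====
-- def sum_even_cubes(pos_integer):
--     '''
--     Returns a sum after adding the cubes of all even numbers less than
--     given positive integer. Assumes integer greater than zero.
--     '''
--     list1 = []
--     list2 = []
--     total = 0
--     for num in range(1,pos_integer):
--         list1.append(num)
--
--     for num in list1:
--         if num % 2 == 0:
--             list2.append(num)
--
--     for num in list2:
--         num = num * num * num
--         total += num
--
--     return total
-- ===== SOURCE B (Python) =====
-- def sum_even_cubes(pos_integer):
--     '''Closed form: the evens below n are 2,4,...,2m with m=(n-1)//2,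
--     and sum of their cubes is 8*(m*(m+1)/2)**2 = 2*(m*(m+1))**2.'''
--     m = (pos_integer - 1) // 2
--     if m < 0:
--         m = 0
--     return 2 * (m * (m + 1)) ** 2
-- ===== Notes on version B (the rewrite author's own statement) =====
-- stated objective: faster
-- what changed: Replaced the three list-building loops with the closed-form formula 2*(m*(m+1))**2 for m=(n-1)//2 (clamped at 0).
import Mathlib
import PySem

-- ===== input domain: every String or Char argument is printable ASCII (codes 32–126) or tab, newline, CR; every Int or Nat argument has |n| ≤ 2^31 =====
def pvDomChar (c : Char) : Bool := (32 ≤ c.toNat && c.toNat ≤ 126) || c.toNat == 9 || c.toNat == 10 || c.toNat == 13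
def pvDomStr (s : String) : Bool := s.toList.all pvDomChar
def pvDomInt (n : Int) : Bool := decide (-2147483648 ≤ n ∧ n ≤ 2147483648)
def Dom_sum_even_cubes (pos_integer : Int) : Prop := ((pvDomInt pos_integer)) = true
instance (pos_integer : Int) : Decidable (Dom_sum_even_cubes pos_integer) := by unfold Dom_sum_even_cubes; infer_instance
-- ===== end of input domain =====

-- B replaces A's three accumulation loops by the O(1) closed form 2*(m*(m+1))^2 with m = (n-1)//2 clamped at 0.

-- ===== PORT A =====
def sum_even_cubes (pos_integer : Int) : Int :=
  -- list1: 'for num in range(1, pos_integer): list1.append(num)'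
  let list1 : List Int := (PySem.List.pyRange 1 pos_integer 1).foldl (fun acc num => acc ++ [num]) []
  -- list2: 'if num % 2 == 0: list2.append(num)'
  let list2 : List Int := list1.foldl (fun acc num => if PySem.Int.mod num 2 == 0 then acc ++ [num] else acc) []
  -- total: 'num = num*num*num; total += num'
  list2.foldl (fun total num => total + num * num * num) 0

-- ===== PORT B =====
def sum_even_cubes_alt (pos_integer : Int) : Int :=
  let m0 := PySem.Int.floordiv (pos_integer - 1) 2
  let m := if m0 < 0 then 0 else m0
  2 * (m * (m + 1)) ^ 2

-- ===== PRECONDITION & SPEC =====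
def Spec_sum_even_cubes (pos_integer : Int) (out : Int) : Prop := out = sum_even_cubes_alt pos_integer
instance (pos_integer : Int) (out : Int) : Decidable (Spec_sum_even_cubes pos_integer out) := by unfold Spec_sum_even_cubes; infer_instance

-- ===== CLAIM (what is proved, stated in full; the proofs are below) =====
def Claim_equal_sum_even_cubes : Prop := ∀ (pos_integer : Int), Dom_sum_even_cubes pos_integer → Spec_sum_even_cubes pos_integer (sum_even_cubes pos_integer)

-- ===== LEMMAS AND PROOFS =====

-- A reduced to a sum of cubes over the filtered range
lemma sum_even_cubes_eq_sum (n : Int) :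
    sum_even_cubes n =
      (((PySem.List.pyRange 1 n 1).filter (fun num => PySem.Int.mod num 2 == 0)).map
        (fun num => num * num * num)).sum := by
  simp only [sum_even_cubes, PySem.List.foldl_append_singleton_eq_self,
    PySem.List.foldl_append_if_eq_filter, List.nil_append,
    PySem.List.foldl_add (g := fun num : Int => num * num * num), zero_add]

-- the core induction: for every natural k, A at n = k+1 equals the closed form with m = k/2
lemma key (k : Nat) :
    (((PySem.List.pyRange 1 ((k : Int) + 1) 1).filter (fun num => PySem.Int.mod num 2 == 0)).map
      (fun num => num * num * num)).sum
      = 2 * (((k : Int) / 2) * ((k : Int) / 2 + 1)) ^ 2 := by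
  induction k with
  | zero =>
      simp [PySem.List.pyRange_one_eq_nil]
  | succ k ih =>
      have h1 : (1 : Int) ≤ (k : Int) + 1 := by omega
      push_cast
      rw [show (k : Int) + 1 + 1 = ((k : Int) + 1) + 1 by ring,
          PySem.List.pyRange_one_succ_right h1,
          List.filter_append, List.map_append, List.sum_append, ih]
      rcases Int.even_or_odd (k : Int) with ⟨m, hm⟩ | ⟨m, hm⟩
      · -- k = 2m even, so k+1 odd: nothing added
        have hmod : ((k : Int) + 1) % 2 = 1 := by omega
        have hk2 : (k : Int) / 2 = m := by omega
        have hk2' : ((k : Int) + 1) / 2 = m := by omega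
        simp [List.filter, hmod, hk2, hk2']
      · -- k odd: k+1 = 2(m+1) even, add (k+1)^3
        have hmod : ((k : Int) + 1) % 2 = 0 := by omega
        have hk2 : (k : Int) / 2 = m := by omega
        have hk2' : ((k : Int) + 1) / 2 = m + 1 := by omega
        simp [List.filter, hmod, hk2, hk2']
        rw [hm]
        ring

lemma alt_pos (k : Nat) : sum_even_cubes_alt ((k : Int) + 1)
    = 2 * (((k : Int) / 2) * ((k : Int) / 2 + 1)) ^ 2 := by
  have hfd : PySem.Int.floordiv ((k : Int) + 1 - 1) 2 = (k : Int) / 2 := by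
    simp [PySem.Int.floordiv, Int.fdiv_eq_ediv]
  have hnn : ¬ ((k : Int) / 2 < 0) := by omega
  simp only [sum_even_cubes_alt, hfd, if_neg hnn]

-- ===== VERDICT (by name: the statement is the Claim_ definition above) =====
theorem sum_even_cubes_spec : Claim_equal_sum_even_cubes := by
  intro n _
  unfold Spec_sum_even_cubes
  by_cases hn : 1 ≤ n
  · obtain ⟨k, hk⟩ : ∃ k : Nat, n = (k : Int) + 1 := ⟨(n - 1).toNat, by omega⟩
    rw [hk, sum_even_cubes_eq_sum, key, alt_pos]
  · -- n ≤ 1: range empty, closed form clamps to 0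
    have hr : PySem.List.pyRange 1 n 1 = [] := PySem.List.pyRange_one_eq_nil (by omega)
    rw [sum_even_cubes_eq_sum, hr]
    have hneg : PySem.Int.floordiv (n - 1) 2 < 0 := by
      simp [PySem.Int.floordiv, Int.fdiv_eq_ediv]
      omega
    simp only [sum_even_cubes_alt, if_pos hneg]
    norm_num
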